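-- pv_equiv track=rewrite | github.com/anjhoon/CS313E | Bridge.py | move2
-- ===== SOURCE A (Python) =====
-- def move2(people):
--     time2 = 0
--     cross = []
--
--     while len(people) > 2:
--         # bring over fastest 2 and take back fastest one
--
--         cross.append(people[1])
--         time2 += people[0] + people[1]
--         people.pop(1)
--     if len(people) == 1:
--         time2 += people[0]
--     elif len(people) == 2:
--         time2 += people[1]
--
--     return time2
-- ===== SOURCE B (Python) =====
-- def move2(people):
--     # Closed form: the loop adds people[0] once per popped element plus the
--     # sum of people[1:].  (Return-value equivalence only: A empties its
--     # argument in place; B does not mutate it.)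
--     n = len(people)
--     if n == 0:
--         return 0
--     if n == 1:
--         return people[0]
--     return (n - 2) * people[0] + sum(people[1:])
-- ===== Notes on version B (the rewrite author's own statement) =====
-- stated objective: faster
-- what changed: Replaced the while-loop that repeatedly pops index 1 with a closed-form sum: (n-2)*people[0] + sum(people[1:]).
import Mathlib
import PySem

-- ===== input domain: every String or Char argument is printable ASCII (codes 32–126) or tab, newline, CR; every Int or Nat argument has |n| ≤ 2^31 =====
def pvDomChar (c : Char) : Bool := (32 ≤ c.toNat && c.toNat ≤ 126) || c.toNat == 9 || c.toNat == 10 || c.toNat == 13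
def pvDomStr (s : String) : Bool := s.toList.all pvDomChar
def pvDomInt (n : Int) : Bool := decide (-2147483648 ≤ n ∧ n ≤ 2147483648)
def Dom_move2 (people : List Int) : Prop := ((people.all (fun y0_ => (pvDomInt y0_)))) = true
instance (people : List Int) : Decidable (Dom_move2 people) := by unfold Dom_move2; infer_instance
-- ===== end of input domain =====

-- B replaces A's quadratic pop(1) loop with a closed-form sum (faster, O(n));
-- return-value equivalence only: A empties its list argument in place, B does not mutate.


-- ===== PORT A =====
-- while len(people) > 2: time2 += people[0] + people[1]; people.pop(1)
-- then the two tail cases.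
def move2Loop : List Int → Int → Int
  | p0 :: p1 :: p2 :: rest, time2 => move2Loop (p0 :: p2 :: rest) (time2 + (p0 + p1))
  | [p0], time2 => time2 + p0
  | [_, p1], time2 => time2 + p1
  | [], time2 => time2
termination_by people _ => people.length
decreasing_by simp

def move2 (people : List Int) : Int := move2Loop people 0

-- ===== PORT B =====
def move2_alt (people : List Int) : Int :=
  match people with
  | [] => 0
  | [p0] => p0
  | p0 :: rest => ((people.length : Int) - 2) * p0 + rest.sum

-- ===== PRECONDITION & SPEC =====
def Spec_move2 (people : List Int) (out : Int) : Prop := out = move2_alt people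
instance (people : List Int) (out : Int) : Decidable (Spec_move2 people out) := by unfold Spec_move2; infer_instance

-- ===== CLAIM (what is proved, stated in full; the proofs are below) =====
def Claim_equal_move2 : Prop := ∀ (people : List Int), Dom_move2 people → Spec_move2 people (move2 people)

-- ===== LEMMAS AND PROOFS =====
theorem move2Loop_cons (p0 : Int) (l : List Int) (t : Int) (h : l ≠ []) :
    move2Loop (p0 :: l) t = t + ((l.length : Int) - 1) * p0 + l.sum := by
  induction l generalizing t with
  | nil => exact absurd rfl h
  | cons p1 l' ih =>
    cases l' with
    | nil => rw [move2Loop]; simp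
    | cons q l'' =>
      rw [move2Loop, ih _ (by simp)]
      simp only [List.sum_cons, List.length_cons]
      push_cast
      ring

-- ===== VERDICT (by name: the statement is the Claim_ definition above) =====
theorem move2_spec : Claim_equal_move2 := by
  intro people _
  unfold Spec_move2 move2
  cases people with
  | nil => rw [move2Loop]; rfl
  | cons p0 l =>
    cases l with
    | nil => rw [move2Loop]; simp [move2_alt]
    | cons p1 l' =>
      rw [move2Loop_cons p0 (p1 :: l') 0 (by simp)]
      simp only [move2_alt, List.sum_cons, List.length_cons]
      push_cast
      ring
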